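-- pv_equiv track=rewrite | github.com/zhaochengyang12345/Python_PCG | 5_Isolated_Murmur_PCG_Dataset/pcg_processor.py | _find_state_onsets
-- ===== SOURCE A (Python) =====
-- def _find_state_onsets(states, target_state=1):
--     """返回状态序列中 target_state 的所有起始（上升沿）样本索引。"""
--     onsets = []
--     in_state = False
--     for idx, s in enumerate(states):
--         if s == target_state and not in_state:
--             onsets.append(idx)
--             in_state = True
--         elif s != target_state:
--             in_state = False
--     return onsets
-- ===== SOURCE B (Python) =====
-- def _find_state_onsets(states, target_state=1):
--     """Stateless rising-edge detection: pair each element with its predecessor."""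
--     prevs = [None] + list(states)[:-1]
--     return [i for i, (s, p) in enumerate(zip(states, prevs))
--             if s == target_state and p != target_state]
-- ===== Notes on version B (the rewrite author's own statement) =====
-- stated objective: simpler
-- what changed: Replaces A's stateful loop with an in_state flag by a stateless comprehension that zips each element with its predecessor and keeps indices where the value equals the target but the predecessor does not.
import Mathlib
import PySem

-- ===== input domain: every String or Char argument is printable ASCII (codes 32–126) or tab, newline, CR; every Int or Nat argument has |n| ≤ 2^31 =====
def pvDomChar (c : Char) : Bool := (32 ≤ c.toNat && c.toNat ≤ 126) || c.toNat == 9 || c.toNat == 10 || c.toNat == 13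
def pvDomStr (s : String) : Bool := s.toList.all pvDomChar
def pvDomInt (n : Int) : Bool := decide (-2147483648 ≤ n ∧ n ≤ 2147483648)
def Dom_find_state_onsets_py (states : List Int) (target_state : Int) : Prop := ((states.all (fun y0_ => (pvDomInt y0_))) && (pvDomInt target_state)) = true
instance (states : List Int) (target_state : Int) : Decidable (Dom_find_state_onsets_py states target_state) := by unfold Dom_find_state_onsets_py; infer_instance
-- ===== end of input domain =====

-- B replaces A's cross-iteration `in_state` flag with a stateless comprehension that
-- pairs each element with its predecessor (objective: simpler decomposition, same cost).

-- ===== PORT A =====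
-- stateful loop: append idx on a rising edge, tracked by the in_state flag
def find_state_onsets_py (states : List Int) (target_state : Int) : List Int :=
  ((PySem.List.enumerate states).foldl
    (fun (acc : List Int × Bool) p =>
      if p.2 == target_state && !acc.2 then (acc.1 ++ [p.1], true)
      else if p.2 != target_state then (acc.1, false)
      else acc) ([], false)).1

-- ===== PORT B =====
-- stateless: zip each element with its predecessor (None before the first), keep rising edges
def find_state_onsets_py_alt (states : List Int) (target_state : Int) : List Int :=
  let prevs : List (Option Int) := none :: (states.map some).dropLast
  ((PySem.List.enumerate (states.zip prevs)).filter
    (fun q => q.2.1 == target_state && q.2.2 != some target_state)).map (·.1)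

-- ===== PRECONDITION & SPEC =====
def Spec_find_state_onsets_py (states : List Int) (target_state : Int) (out : List Int) : Prop := out = find_state_onsets_py_alt states target_state
instance (states : List Int) (target_state : Int) (out : List Int) : Decidable (Spec_find_state_onsets_py states target_state out) := by unfold Spec_find_state_onsets_py; infer_instance

-- ===== CLAIM (what is proved, stated in full; the proofs are below) =====
def Claim_equal_find_state_onsets_py : Prop := ∀ (states : List Int) (target_state : Int), Dom_find_state_onsets_py states target_state → Spec_find_state_onsets_py states target_state (find_state_onsets_py states target_state)

-- ===== LEMMAS AND PROOFS =====

-- common characterisation: rising edges of l starting at index i, with flag = "previous element was the target"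
def goSpec (t : Int) (flag : Bool) (i : Int) : List Int → List Int
  | [] => []
  | s :: r => (if (s == t) && !flag then [i] else []) ++ goSpec t (s == t) (i + 1) r

theorem A_eq_goSpec (t : Int) : ∀ (l : List Int) (acc : List Int) (flag : Bool) (i : Int),
    ((PySem.List.enumerate l i).foldl
      (fun (acc : List Int × Bool) p =>
        if p.2 == t && !acc.2 then (acc.1 ++ [p.1], true)
        else if p.2 != t then (acc.1, false)
        else acc) (acc, flag)).1 = acc ++ goSpec t flag i l := by
  intro l
  induction l with
  | nil => intro acc flag i; simp [PySem.List.enumerate_nil, goSpec]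
  | cons s r ih =>
    intro acc flag i
    rw [PySem.List.enumerate_cons, List.foldl_cons]
    split_ifs with h1 h2
    · rw [ih]
      simp only [Bool.and_eq_true, Bool.not_eq_true'] at h1
      obtain ⟨hs, hf⟩ := h1
      have hs' : s = t := by simpa using hs
      subst hs'; subst hf
      simp [goSpec]
    · rw [ih]
      have hs : ¬ s = t := by simpa using h2
      have hs' : (s == t) = false := by simp [hs]
      simp [goSpec, hs']
    · rw [ih]
      have hs : s = t := by
        by_contra hcon
        exact h2 (by simpa using hcon)
      have hf : flag = true := by
        by_contra hcon
        exact h1 (by simp [hs, Bool.not_eq_true] at hcon ⊢; simp [hcon])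
      subst hs; subst hf
      simp [goSpec]

theorem B_eq_goSpec (t : Int) : ∀ (l : List Int) (p0 : Option Int) (i : Int),
    ((PySem.List.enumerate (l.zip (p0 :: (l.map some).dropLast)) i).filter
      (fun q => q.2.1 == t && q.2.2 != some t)).map (·.1)
      = goSpec t (p0 == some t) i l := by
  intro l
  induction l with
  | nil => intro p0 i; simp [PySem.List.enumerate_nil, goSpec]
  | cons s r ih =>
    intro p0 i
    have hzip : (s :: r).zip (p0 :: ((s :: r).map some).dropLast)
        = (s, p0) :: r.zip (some s :: (r.map some).dropLast) := by
      cases r with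
      | nil => simp
      | cons x rs => simp [List.zip]
    rw [hzip, PySem.List.enumerate_cons, List.filter_cons]
    by_cases hs : s = t
    · subst hs
      by_cases hp : p0 = some s
      · subst hp; simp [goSpec, ih]
      · simp [goSpec, hp, ih]
    · simp [goSpec, hs, ih]

-- ===== VERDICT (by name: the statement is the Claim_ definition above) =====
theorem find_state_onsets_py_spec : Claim_equal_find_state_onsets_py := by
  intro states t _
  unfold Spec_find_state_onsets_py
  have hA : find_state_onsets_py states t = [] ++ goSpec t false 0 states :=
    A_eq_goSpec t states [] false 0
  have hB : find_state_onsets_py_alt states t = goSpec t ((none : Option Int) == some t) 0 states :=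
    B_eq_goSpec t states none 0
  rw [hA, hB]
  simp
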